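-- pv_equiv track=rewrite | github.com/kawixKrul/algo-grafowe | lab1/findunion.py | get_min_from_path
-- ===== SOURCE A (Python) =====
-- from queue import Queue
--
-- def get_min_from_path(G):
--     parent = [None for _ in range(len(G))]
--     visited = [False for _ in range(len(G))]
--     parent_edge = [0 for _ in range(len(G))]
--     Q = Queue()
--     Q.put(0)
--     visited[0] = True
--     while not Q.empty():
--         u = Q.get()
--         for (v, l) in G[u]:
--             if not visited[v]:
--                 Q.put(v)
--                 visited[v] = True
--                 parent[v] = u
--                 parent_edge[v] = l
--     curr = parent[1]
--     edges = [parent_edge[1]]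
--     while curr is not None:
--         edges.append(parent_edge[curr])
--         curr = parent[curr]
--     return min(edges[:-1])
-- ===== SOURCE B (Python) =====
-- def get_min_from_path(G):
--     # Level-synchronous BFS from node 0 propagating the minimum edge weight on
--     # the path forward; no queue object, no parent arrays, no backtracking pass.
--     n = len(G)
--     best = [None] * n
--     visited = [False] * n
--     visited[0] = True
--     frontier = [0]
--     while frontier:
--         nxt = []
--         for u in frontier:
--             for (v, l) in G[u]:
--                 if not visited[v]:
--                     visited[v] = True
--                     best[v] = l if best[u] is None else min(best[u], l)
--                     nxt.append(v)
--         frontier = nxt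
--     if best[1] is None:
--         raise ValueError("node 1 is unreachable from node 0")
--     return best[1]
-- ===== Notes on version B (the rewrite author's own statement) =====
-- stated objective: simpler
-- what changed: B runs a level-synchronous frontier BFS that propagates the minimum edge weight forward (best[v] = min(best[u], l) at discovery), dropping A's Queue object, parent/parent_edge arrays and the whole second backtracking-and-collect loop.
import Mathlib
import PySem

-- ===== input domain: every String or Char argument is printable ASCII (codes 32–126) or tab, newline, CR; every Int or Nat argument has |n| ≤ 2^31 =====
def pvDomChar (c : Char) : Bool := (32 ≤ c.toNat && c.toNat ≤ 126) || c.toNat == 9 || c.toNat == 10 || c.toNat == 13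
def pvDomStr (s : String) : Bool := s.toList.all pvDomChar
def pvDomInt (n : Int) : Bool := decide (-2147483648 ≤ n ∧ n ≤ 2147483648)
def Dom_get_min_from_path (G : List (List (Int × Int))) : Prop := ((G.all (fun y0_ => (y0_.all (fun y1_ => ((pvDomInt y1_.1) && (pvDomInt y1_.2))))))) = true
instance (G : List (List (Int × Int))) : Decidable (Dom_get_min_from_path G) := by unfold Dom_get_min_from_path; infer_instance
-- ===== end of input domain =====

-- B replaces A's "FIFO-queue BFS with parent pointers, then backtrack from node 1 collecting edges"
-- by a level-synchronous frontier BFS that forward-propagates the minimum edge weight from node 0.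

-- Python index resolution for a list of length `len` (negative indices count from the end).
def pvIdx (len : Nat) (v : Int) : Int := if v < 0 then v + len else v

-- helper lemma cited by the ports' `decreasing_by` (counting unvisited cells).
theorem pvCountFalse_set (vis : List Bool) (j : Nat) (h : j < vis.length)
    (hf : vis.getD j false = false) :
    (vis.set j true).count false + 1 = vis.count false := by
  induction vis generalizing j with
  | nil => simp at h
  | cons b t ih =>
    cases j with
    | zero => simp_all [List.count_cons]
    | succ k =>
      simp only [List.length_cons, Nat.succ_lt_succ_iff] at h
      simp only [List.getD_cons_succ] at hf
      simp only [List.set_cons_succ, List.count_cons]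
      have := ih k h hf
      omega

-- ===== PORT A =====
-- inner `for (v, l) in G[u]` loop of A's BFS (queue, visited, parent, parent_edge).
-- The bound check `0 ≤ j ∧ j.toNat < vis.length` is a totality guard: Python raises
-- IndexError on an out-of-range index there, and Pre_ excludes those inputs.
def pvProcA (u : Nat) (adj : List (Int × Int)) (q : List Nat) (vis : List Bool)
    (par : List (Option Nat)) (ped : List Int) :
    List Nat × List Bool × List (Option Nat) × List Int :=
  match adj with
  | [] => (q, vis, par, ped)
  | (v, l) :: rest =>
    let j := pvIdx vis.length v
    if h : 0 ≤ j ∧ j.toNat < vis.length ∧ vis.getD j.toNat false = false then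
      pvProcA u rest (q ++ [j.toNat]) (vis.set j.toNat true)
        (par.set j.toNat (some u)) (ped.set j.toNat l)
    else
      pvProcA u rest q vis par ped

theorem pvProcA_measure (u : Nat) (adj : List (Int × Int)) (q : List Nat) (vis : List Bool)
    (par : List (Option Nat)) (ped : List Int) :
    2 * (pvProcA u adj q vis par ped).2.1.count false + (pvProcA u adj q vis par ped).1.length
      ≤ 2 * vis.count false + q.length := by
  induction adj generalizing q vis par ped with
  | nil => simp [pvProcA]
  | cons e rest ih =>
    obtain ⟨v, l⟩ := e
    simp only [pvProcA]
    split
    · rename_i h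
      have hcnt := pvCountFalse_set vis (pvIdx vis.length v).toNat h.2.1 h.2.2
      have := ih (q ++ [(pvIdx vis.length v).toNat]) (vis.set (pvIdx vis.length v).toNat true)
        (par.set (pvIdx vis.length v).toNat (some u)) (ped.set (pvIdx vis.length v).toNat l)
      simp only [List.length_append, List.length_cons, List.length_nil] at this ⊢
      omega
    · exact le_trans (ih q vis par ped) (by simp)

-- A's outer `while not Q.empty()` BFS loop.
def pvLoopA (G : List (List (Int × Int))) (q : List Nat) (vis : List Bool)
    (par : List (Option Nat)) (ped : List Int) :
    List Bool × List (Option Nat) × List Int :=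
  match q with
  | [] => (vis, par, ped)
  | u :: q' =>
    let s := pvProcA u (G.getD u []) q' vis par ped
    pvLoopA G s.1 s.2.1 s.2.2.1 s.2.2.2
termination_by 2 * vis.count false + q.length
decreasing_by
  have := pvProcA_measure u (G.getD u []) q' vis par ped
  simp only [List.length_cons]
  omega

-- A's backtracking loop `while curr is not None: edges.append(parent_edge[curr]); curr = parent[curr]`.
-- The fuel (length of G + 1) is a totality guard; the proof shows parent chains are shorter.
def pvBackA (par : List (Option Nat)) (ped : List Int) : Nat → Option Nat → List Int → List Int
  | 0, _, acc => acc
  | _ + 1, none, acc => acc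
  | fuel + 1, some c, acc => pvBackA par ped fuel (par.getD c none) (acc ++ [ped.getD c 0])

-- On inputs excluded by Pre_ the Python raises (IndexError, or ValueError from taking the minimum of an empty edge list);
-- there this port returns the default 0.
def get_min_from_path (G : List (List (Int × Int))) : Int :=
  let n := G.length
  let s := pvLoopA G [0] ((List.replicate n false).set 0 true)
    (List.replicate n (none : Option Nat)) (List.replicate n (0 : Int))
  let par := s.2.1
  let ped := s.2.2
  let edges := pvBackA par ped (n + 1) (par.getD 1 none) [ped.getD 1 0]
  (PySem.List.min? edges.dropLast (fun x => x)).getD 0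

-- ===== PORT B =====
-- `l if best[u] is None else min(best[u], l)` from Source B.
def pvCombine (o : Option Int) (l : Int) : Int :=
  match o with
  | none => l
  | some m => min m l

-- body of Source B's innermost `for (v, l) in G[u]` step, as a fold step over the
-- state (next frontier, visited, best); same totality guard as A's inner loop.
def pvVisitB (u : Nat) (st : List Nat × List Bool × List (Option Int)) (e : Int × Int) :
    List Nat × List Bool × List (Option Int) :=
  let j := pvIdx st.2.1.length e.1
  if 0 ≤ j ∧ j.toNat < st.2.1.length ∧ st.2.1.getD j.toNat false = false then
    (st.1 ++ [j.toNat], st.2.1.set j.toNat true,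
      st.2.2.set j.toNat (some (pvCombine (st.2.2.getD u none) e.2)))
  else st

-- one round: `nxt = []; for u in frontier: for (v, l) in G[u]: …`.
def pvRoundB (G : List (List (Int × Int))) (fr : List Nat) (vis : List Bool)
    (best : List (Option Int)) : List Nat × List Bool × List (Option Int) :=
  fr.foldl (fun st u => (G.getD u []).foldl (pvVisitB u) st) ([], vis, best)

theorem pvVisitB_measure (u : Nat) (st : List Nat × List Bool × List (Option Int))
    (e : Int × Int) :
    2 * (pvVisitB u st e).2.1.count false + (pvVisitB u st e).1.length
      ≤ 2 * st.2.1.count false + st.1.length := by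
  by_cases h : 0 ≤ pvIdx st.2.1.length e.1 ∧ (pvIdx st.2.1.length e.1).toNat < st.2.1.length ∧
      st.2.1.getD (pvIdx st.2.1.length e.1).toNat false = false
  · have hcnt := pvCountFalse_set st.2.1 (pvIdx st.2.1.length e.1).toNat h.2.1 h.2.2
    simp only [pvVisitB, if_pos h, List.length_append, List.length_cons, List.length_nil]
    omega
  · simp only [pvVisitB, if_neg h]
    exact le_refl _

theorem pvFoldVisit_measure (u : Nat) (adj : List (Int × Int)) :
    ∀ (st : List Nat × List Bool × List (Option Int)),
      2 * (adj.foldl (pvVisitB u) st).2.1.count false + (adj.foldl (pvVisitB u) st).1.length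
        ≤ 2 * st.2.1.count false + st.1.length := by
  induction adj with
  | nil => intro st; exact le_refl _
  | cons e rest ih =>
    intro st
    exact le_trans (ih (pvVisitB u st e)) (pvVisitB_measure u st e)

theorem pvRoundFold_measure (G : List (List (Int × Int))) (fr : List Nat) :
    ∀ (st : List Nat × List Bool × List (Option Int)),
      2 * (fr.foldl (fun st u => (G.getD u []).foldl (pvVisitB u) st) st).2.1.count false
          + (fr.foldl (fun st u => (G.getD u []).foldl (pvVisitB u) st) st).1.length
        ≤ 2 * st.2.1.count false + st.1.length := by
  induction fr with
  | nil => intro st; exact le_refl _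
  | cons u rest ih =>
    intro st
    exact le_trans (ih ((G.getD u []).foldl (pvVisitB u) st)) (pvFoldVisit_measure u (G.getD u []) st)

-- Source B's outer `while frontier:` loop; the emptiness check before recursing is a
-- totality guard (an empty next frontier just ends the Python loop the same way).
def pvBFSB (G : List (List (Int × Int))) (fr : List Nat) (vis : List Bool)
    (best : List (Option Int)) : List (Option Int) :=
  match fr with
  | [] => best
  | u :: rest =>
    let s := pvRoundB G (u :: rest) vis best
    if s.1.isEmpty then s.2.2
    else pvBFSB G s.1 s.2.1 s.2.2
termination_by vis.count false
decreasing_by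
  rename_i hne
  have hm := pvRoundFold_measure G (u :: rest) ([], vis, best)
  simp only [List.isEmpty_iff] at hne
  have h1 : 1 ≤ (pvRoundB G (u :: rest) vis best).1.length := by
    rcases h : (pvRoundB G (u :: rest) vis best).1 with _ | _
    · exact absurd h hne
    · simp
  unfold pvRoundB at *
  simp only [List.length_nil] at hm
  omega

-- On inputs excluded by Pre_ the Python raises (IndexError / the explicit ValueError);
-- there this port returns the default 0.
def get_min_from_path_alt (G : List (List (Int × Int))) : Int :=
  let n := G.length
  let best := pvBFSB G [0] ((List.replicate n false).set 0 true)
    (List.replicate n (none : Option Int))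
  match best.getD 1 none with
  | none => 0
  | some m => m

-- ===== PRECONDITION & SPEC =====
-- reachability from node 0 along in-range edges, as an n-step saturation of the edge relation
-- (this is plain reachability, not either port's BFS: no queue, no parents, no weights).
def pvStep (G : List (List (Int × Int))) (s : List Bool) : List Bool :=
  (List.range s.length).map (fun v =>
    s.getD v false ||
      (List.range s.length).any (fun u =>
        s.getD u false && (G.getD u []).any (fun e =>
          decide (-(s.length : Int) ≤ e.1) && decide (e.1 < (s.length : Int)) &&
            (pvIdx s.length e.1 == (v : Int)))))

def pvReached (G : List (List (Int × Int))) : List Bool :=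
  (pvStep G)^[G.length] ((List.replicate G.length false).set 0 true)

-- Pre_ = exactly the inputs where the Python A returns normally: at least two nodes,
-- node 1 reachable from node 0 (else A's final minimum is over an empty edge list: ValueError; or IndexError for parent lookup),
-- and every edge out of a reached node has an in-range target (else IndexError during BFS).
def Pre_get_min_from_path (G : List (List (Int × Int))) : Prop :=
  2 ≤ G.length ∧ (pvReached G).getD 1 false = true ∧
    ∀ u ∈ List.range G.length, (pvReached G).getD u false = true →
      ∀ e ∈ G.getD u [], -(G.length : Int) ≤ e.1 ∧ e.1 < (G.length : Int)

instance (G : List (List (Int × Int))) : Decidable (Pre_get_min_from_path G) := by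
  unfold Pre_get_min_from_path; infer_instance

def pvWitness_get_min_from_path : (List (List (Int × Int))) := [[(1, 5)], []]

def Spec_get_min_from_path (G : List (List (Int × Int))) (out : Int) : Prop := out = get_min_from_path_alt G
instance (G : List (List (Int × Int))) (out : Int) : Decidable (Spec_get_min_from_path G out) := by unfold Spec_get_min_from_path; infer_instance

-- ===== CLAIM (what is proved, stated in full; the proofs are below) =====
def Claim_equal_get_min_from_path : Prop := ∀ (G : List (List (Int × Int))), Dom_get_min_from_path G → Pre_get_min_from_path G → Spec_get_min_from_path G (get_min_from_path G)

-- ===== LEMMAS AND PROOFS =====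

-- getD/set and counting helper lemmas
theorem pvGetD_set_self {α : Type} (l : List α) (i : Nat) (x d : α) (h : i < l.length) :
    (l.set i x).getD i d = x := by
  simp [List.getD_eq_getElem?_getD, List.getElem?_set_self, h]

theorem pvGetD_set_ne {α : Type} (l : List α) {i j : Nat} (x d : α) (h : i ≠ j) :
    (l.set i x).getD j d = l.getD j d := by
  simp [List.getD_eq_getElem?_getD, List.getElem?_set_ne h]

theorem pvGetD_replicate {α : Type} (n i : Nat) (a b : α) (h : i < n) :
    (List.replicate n a).getD i b = a := by
  simp [List.getD_eq_getElem?_getD, List.getElem?_replicate, h]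

theorem pvCountTrue_set (vis : List Bool) (j : Nat) (h : j < vis.length)
    (hf : vis.getD j false = false) :
    (vis.set j true).count true = vis.count true + 1 := by
  induction vis generalizing j with
  | nil => simp at h
  | cons b t ih =>
    cases j with
    | zero => simp_all [List.count_cons]
    | succ k =>
      simp only [List.length_cons, Nat.succ_lt_succ_iff] at h
      simp only [List.getD_cons_succ] at hf
      simp only [List.set_cons_succ, List.count_cons]
      have := ih k h hf
      omega

-- minimum of two optional ints (none = "no edge yet")
def pvOmin : Option Int → Option Int → Option Int
  | none, b => b
  | some a, none => some a
  | some a, some b => some (min a b)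

theorem pvOmin_none_right (a : Option Int) : pvOmin a none = a := by
  cases a <;> rfl

theorem pvOmin_assoc (a b c : Option Int) : pvOmin (pvOmin a b) c = pvOmin a (pvOmin b c) := by
  cases a <;> cases b <;> cases c <;> simp [pvOmin, min_assoc]

theorem pvOmin_combine (x : Int) (o : Option Int) :
    pvOmin (some x) o = some (pvCombine o x) := by
  cases o <;> simp [pvOmin, pvCombine, min_comm]

theorem pvMin?_snoc (acc : List Int) (x : Int) :
    PySem.List.min? (acc ++ [x]) (fun y => y) = pvOmin (PySem.List.min? acc (fun y => y)) (some x) := by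
  cases acc with
  | nil => simp [PySem.List.min?, pvOmin, List.nil_append, PySem.List.min?_id_cons]
  | cons y t =>
    rw [List.cons_append, PySem.List.min?_id_cons, PySem.List.min?_id_cons]
    simp [List.foldl_append, pvOmin]

-- the queue invariant: every queued node is an in-range, already-visited index
def pvQOK (n : Nat) (vis : List Bool) (q : List Nat) : Prop :=
  ∀ x ∈ q, x < n ∧ vis.getD x false = true

-- the joint BFS invariant relating A's (parent, parent_edge) state to B's best state;
-- d is a ghost depth function making parent chains well-founded
def pvCore (n : Nat) (par : List (Option Nat)) (ped : List Int) (best : List (Option Int))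
    (vis : List Bool) (d : Nat → Nat) : Prop :=
  ∀ v, v < n →
    (par.getD v none = none → best.getD v none = none) ∧
    (vis.getD v false = false → par.getD v none = none) ∧
    (vis.getD v false = true → d v ≤ vis.count true) ∧
    (∀ u, par.getD v none = some u → u < n ∧ vis.getD u false = true ∧ d u < d v ∧
      best.getD v none = some (pvCombine (best.getD u none) (ped.getD v 0)))

-- per-node pairing: A's inner loop on queue q and B's fold on next-frontier nxt
-- discover the same nodes (delta), update visited identically, and keep the invariants
theorem pvPairNode (n u : Nat) (adj : List (Int × Int)) :
    ∀ (q nxt : List Nat) (vis : List Bool) (par : List (Option Nat)) (ped : List Int)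
      (best : List (Option Int)) (d : Nat → Nat),
      vis.length = n → par.length = n → ped.length = n → best.length = n →
      u < n → vis.getD u false = true →
      pvQOK n vis (q ++ nxt) → pvCore n par ped best vis d →
      ∃ delta,
        (pvProcA u adj q vis par ped).1 = q ++ delta ∧
        (adj.foldl (pvVisitB u) (nxt, vis, best)).1 = nxt ++ delta ∧
        (adj.foldl (pvVisitB u) (nxt, vis, best)).2.1 = (pvProcA u adj q vis par ped).2.1 ∧
        (pvProcA u adj q vis par ped).2.1.length = n ∧
        (pvProcA u adj q vis par ped).2.2.1.length = n ∧
        (pvProcA u adj q vis par ped).2.2.2.length = n ∧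
        (adj.foldl (pvVisitB u) (nxt, vis, best)).2.2.length = n ∧
        pvQOK n (pvProcA u adj q vis par ped).2.1 (q ++ nxt ++ delta) ∧
        ∃ d', pvCore n (pvProcA u adj q vis par ped).2.2.1 (pvProcA u adj q vis par ped).2.2.2
          (adj.foldl (pvVisitB u) (nxt, vis, best)).2.2 (pvProcA u adj q vis par ped).2.1 d' := by
  induction adj with
  | nil =>
    intro q nxt vis par ped best d hlv hlp hle hlb hun hvu hq hc
    refine ⟨[], ?_, ?_, ?_, ?_, ?_, ?_, ?_, ?_, d, ?_⟩ <;>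
      simp only [pvProcA, List.foldl_nil, List.append_nil]
    · exact hlv
    · exact hlp
    · exact hle
    · exact hlb
    · exact hq
    · exact hc
  | cons e rest ih =>
    intro q nxt vis par ped best d hlv hlp hle hlb hun hvu hq hc
    obtain ⟨v, l⟩ := e
    simp only [pvProcA, List.foldl_cons]
    by_cases h : 0 ≤ pvIdx vis.length v ∧ (pvIdx vis.length v).toNat < vis.length ∧
        vis.getD (pvIdx vis.length v).toNat false = false
    · rw [dif_pos h]
      have hB : pvVisitB u (nxt, vis, best) (v, l)
          = (nxt ++ [(pvIdx vis.length v).toNat], vis.set (pvIdx vis.length v).toNat true,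
             best.set (pvIdx vis.length v).toNat (some (pvCombine (best.getD u none) l))) := by
        simp only [pvVisitB]
        rw [if_pos h]
      rw [hB]
      set w := (pvIdx vis.length v).toNat with hw
      have hwn : w < n := hlv ▸ h.2.1
      have hwf : vis.getD w false = false := h.2.2
      have huw : u ≠ w := fun he => by rw [he, hwf] at hvu; exact Bool.false_ne_true hvu
      have hcnt := pvCountTrue_set vis w h.2.1 hwf
      obtain ⟨delta', e1, e2, e3, l1, l2, l3, l4, hqok, d', hcore⟩ :=
        ih (q ++ [w]) (nxt ++ [w]) (vis.set w true) (par.set w (some u)) (ped.set w l)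
          (best.set w (some (pvCombine (best.getD u none) l)))
          (fun x => if x = w then vis.count true + 1 else d x)
          (by simpa using hlv) (by simpa using hlp) (by simpa using hle) (by simpa using hlb)
          hun (by rw [pvGetD_set_ne vis true false huw.symm]; exact hvu)
          (by -- queue invariant for (q ++ [w]) ++ (nxt ++ [w])
            intro x hx
            have hx' : x ∈ q ∨ x ∈ nxt ∨ x = w := by
              simp only [List.mem_append, List.mem_singleton] at hx
              tauto
            rcases hx' with hx' | hx' | hx'
            · obtain ⟨hxn, hxv⟩ := hq x (List.mem_append.mpr (Or.inl hx'))
              have hxw : w ≠ x := fun he => by rw [← he, hwf] at hxv; exact Bool.false_ne_true hxv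
              exact ⟨hxn, by rw [pvGetD_set_ne vis true false hxw]; exact hxv⟩
            · obtain ⟨hxn, hxv⟩ := hq x (List.mem_append.mpr (Or.inr hx'))
              have hxw : w ≠ x := fun he => by rw [← he, hwf] at hxv; exact Bool.false_ne_true hxv
              exact ⟨hxn, by rw [pvGetD_set_ne vis true false hxw]; exact hxv⟩
            · subst hx'
              exact ⟨hwn, pvGetD_set_self vis w true false h.2.1⟩)
          (by -- core invariant
            intro v' hv'
            by_cases hvw : v' = w
            · subst hvw
              refine ⟨?_, ?_, ?_, ?_⟩
              · rw [pvGetD_set_self par w (some u) none (hlp ▸ hwn)]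
                intro hco; exact absurd hco (by simp)
              · rw [pvGetD_set_self vis w true false (hlv ▸ hwn)]
                intro hco; exact absurd hco (by simp)
              · intro _; rw [hcnt]; simp
              · intro u' hpu'
                rw [pvGetD_set_self par w (some u) none (hlp ▸ hwn)] at hpu'
                obtain rfl : u = u' := by simpa using hpu'
                have hdu : d u ≤ vis.count true := ((hc u hun).2.2.1) hvu
                refine ⟨hun, by rw [pvGetD_set_ne vis true false (fun he => huw he.symm)]; exact hvu,
                  by simp [huw]; omega, ?_⟩
                rw [pvGetD_set_self best w _ none (hlb ▸ hwn),
                  pvGetD_set_ne best _ none (fun he => huw he.symm),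
                  pvGetD_set_self ped w l 0 (hle ▸ hwn)]
            · have hvw' : w ≠ v' := fun he => hvw he.symm
              obtain ⟨c1, c2, c3, c4⟩ := hc v' hv'
              rw [pvGetD_set_ne par (some u) none hvw', pvGetD_set_ne vis true false hvw',
                pvGetD_set_ne best _ none hvw', pvGetD_set_ne ped l 0 hvw']
              refine ⟨c1, c2, ?_, ?_⟩
              · intro hvt; simp [hvw]; have := c3 hvt; omega
              · intro u' hpu'
                obtain ⟨d1, d2, d3, d4⟩ := c4 u' hpu'
                have hu'w : w ≠ u' := fun he => by rw [← he, hwf] at d2; exact Bool.false_ne_true d2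
                refine ⟨d1, by rw [pvGetD_set_ne vis true false hu'w]; exact d2, ?_, ?_⟩
                · have hu'ne : ¬ u' = w := fun he => hu'w he.symm
                  simp [hvw, hu'ne]; exact d3
                · rw [pvGetD_set_ne best _ none hu'w]; exact d4)
      refine ⟨[w] ++ delta', ?_, ?_, e3, l1, l2, l3, l4, ?_, d', hcore⟩
      · rw [e1, List.append_assoc]
      · rw [e2, List.append_assoc]
      · intro x hx
        apply hqok x
        simp only [List.mem_append, List.mem_singleton] at hx ⊢
        tauto
    · rw [dif_neg h]
      have hB : pvVisitB u (nxt, vis, best) (v, l) = (nxt, vis, best) := by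
        simp only [pvVisitB]
        rw [if_neg h]
      rw [hB]
      exact ih q nxt vis par ped best d hlv hlp hle hlb hun hvu hq hc

-- round pairing: running A's BFS loop on (frontier ++ carried queue) equals running it
-- from the state after B's whole round over the frontier
theorem pvPairRound (G : List (List (Int × Int))) (n : Nat) (hn : n = G.length) (fr : List Nat) :
    ∀ (nxt : List Nat) (vis : List Bool) (par : List (Option Nat)) (ped : List Int)
      (best : List (Option Int)) (d : Nat → Nat),
      vis.length = n → par.length = n → ped.length = n → best.length = n →
      pvQOK n vis (fr ++ nxt) → pvCore n par ped best vis d →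
      ∃ par' ped' d',
        pvLoopA G (fr ++ nxt) vis par ped
          = pvLoopA G (fr.foldl (fun st u => (G.getD u []).foldl (pvVisitB u) st) (nxt, vis, best)).1
              (fr.foldl (fun st u => (G.getD u []).foldl (pvVisitB u) st) (nxt, vis, best)).2.1 par' ped' ∧
        (fr.foldl (fun st u => (G.getD u []).foldl (pvVisitB u) st) (nxt, vis, best)).2.1.length = n ∧
        par'.length = n ∧ ped'.length = n ∧
        (fr.foldl (fun st u => (G.getD u []).foldl (pvVisitB u) st) (nxt, vis, best)).2.2.length = n ∧
        pvQOK n (fr.foldl (fun st u => (G.getD u []).foldl (pvVisitB u) st) (nxt, vis, best)).2.1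
          (fr.foldl (fun st u => (G.getD u []).foldl (pvVisitB u) st) (nxt, vis, best)).1 ∧
        pvCore n par' ped'
          (fr.foldl (fun st u => (G.getD u []).foldl (pvVisitB u) st) (nxt, vis, best)).2.2
          (fr.foldl (fun st u => (G.getD u []).foldl (pvVisitB u) st) (nxt, vis, best)).2.1 d' := by
  induction fr with
  | nil =>
    intro nxt vis par ped best d hlv hlp hle hlb hq hc
    refine ⟨par, ped, d, ?_, hlv, hlp, hle, hlb, ?_, hc⟩
    · simp only [List.foldl_nil, List.nil_append]
    · simpa using hq
  | cons u fr' ih =>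
    intro nxt vis par ped best d hlv hlp hle hlb hq hc
    have hu := hq u (by simp)
    obtain ⟨delta, e1, e2, e3, l1, l2, l3, l4, hqok, d1, hcore⟩ :=
      pvPairNode n u (G.getD u []) (fr' ++ nxt) nxt vis par ped best d hlv hlp hle hlb hu.1 hu.2
        (by intro x hx; apply hq
            simp only [List.cons_append, List.mem_cons, List.mem_append] at hx ⊢; tauto) hc
    set s := pvProcA u (G.getD u []) (fr' ++ nxt) vis par ped with hs
    set b := (G.getD u []).foldl (pvVisitB u) (nxt, vis, best) with hbdef
    have hb : b = (nxt ++ delta, s.2.1, b.2.2) := by rw [← e2, ← e3]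
    have hqok' : pvQOK n s.2.1 (fr' ++ (nxt ++ delta)) := by
      intro x hx; apply hqok
      simp only [List.mem_append] at hx ⊢; tauto
    obtain ⟨par', ped', d2, heq, m1, m2, m3, m4, hq2, hc2⟩ :=
      ih (nxt ++ delta) s.2.1 s.2.2.1 s.2.2.2 b.2.2 d1 l1 l2 l3 l4 hqok' hcore
    refine ⟨par', ped', d2, ?_, ?_, m2, m3, ?_, ?_, ?_⟩
    · rw [List.cons_append, pvLoopA]
      simp only [← hs]
      rw [List.foldl_cons, ← hbdef, hb, e1, List.append_assoc]
      exact heq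
    · rw [List.foldl_cons, ← hbdef, hb]; exact m1
    · rw [List.foldl_cons, ← hbdef, hb]; exact m4
    · rw [List.foldl_cons, ← hbdef, hb]; exact hq2
    · rw [List.foldl_cons, ← hbdef, hb]; exact hc2

-- whole-BFS pairing: A's loop and B's round recursion end with states linked by pvCore
theorem pvPairBFS (G : List (List (Int × Int))) (n : Nat) (hn : n = G.length) :
    ∀ (m : Nat) (fr : List Nat) (vis : List Bool) (par : List (Option Nat)) (ped : List Int)
      (best : List (Option Int)) (d : Nat → Nat),
      vis.count false < m →
      vis.length = n → par.length = n → ped.length = n → best.length = n →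
      pvQOK n vis fr → pvCore n par ped best vis d →
      (pvLoopA G fr vis par ped).1.length = n ∧
      ∃ d', pvCore n (pvLoopA G fr vis par ped).2.1 (pvLoopA G fr vis par ped).2.2
        (pvBFSB G fr vis best) (pvLoopA G fr vis par ped).1 d' := by
  intro m
  induction m using Nat.strong_induction_on with
  | _ m ihm =>
    intro fr vis par ped best d hm hlv hlp hle hlb hq hc
    cases fr with
    | nil => rw [pvLoopA, pvBFSB]; exact ⟨hlv, d, hc⟩
    | cons u fr' =>
      obtain ⟨par', ped', d1, heq, m1, m2, m3, m4, hq1, hc1⟩ :=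
        pvPairRound G n hn (u :: fr') [] vis par ped best d hlv hlp hle hlb (by simpa using hq) hc
      rw [List.append_nil] at heq
      set R := (u :: fr').foldl (fun st u => (G.getD u []).foldl (pvVisitB u) st) ([], vis, best)
        with hR
      rw [heq, pvBFSB]
      simp only [pvRoundB, ← hR]
      by_cases hemp : R.1.isEmpty
      · rw [if_pos hemp]
        rw [List.isEmpty_iff.mp hemp, pvLoopA]
        exact ⟨m1, d1, hc1⟩
      · rw [if_neg hemp]
        have hmeas := pvRoundFold_measure G (u :: fr') ([], vis, best)
        rw [← hR] at hmeas
        have hlen1 : 1 ≤ R.1.length := by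
          rcases hx : R.1 with _ | _
          · exact absurd (List.isEmpty_iff.mpr hx) hemp
          · simp
        simp only [List.length_nil] at hmeas
        exact ihm (R.2.1.count false + 1) (by omega) R.1 R.2.1 par' ped' R.2.2 d1 (by omega)
          m1 m2 m3 m4 hq1 hc1

theorem pvBack_min (n : Nat) (par : List (Option Nat)) (ped : List Int)
    (best : List (Option Int)) (vis : List Bool) (d : Nat → Nat)
    (hc : pvCore n par ped best vis d) :
    ∀ (fuel v : Nat), v < n → d v < fuel → ∀ acc : List Int,
      PySem.List.min? ((pvBackA par ped fuel (par.getD v none) (acc ++ [ped.getD v 0])).dropLast)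
          (fun x => x)
        = pvOmin (PySem.List.min? acc (fun x => x)) (best.getD v none) := by
  intro fuel
  induction fuel with
  | zero => intro v _ hdv; omega
  | succ f ih =>
    intro v hv hdv acc
    cases hpar : par.getD v none with
    | none =>
      have hbnone := (hc v hv).1 hpar
      rw [hbnone, pvOmin_none_right]
      simp [pvBackA, List.dropLast_concat]
    | some u =>
      obtain ⟨hun, hvisu, hdu, hbest⟩ := (hc v hv).2.2.2 u hpar
      show PySem.List.min? ((pvBackA par ped f (par.getD u none)
          ((acc ++ [ped.getD v 0]) ++ [ped.getD u 0])).dropLast) (fun x => x) = _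
      rw [ih u hun (by omega) (acc ++ [ped.getD v 0])]
      rw [pvMin?_snoc, pvOmin_assoc, pvOmin_combine, hbest]

theorem pvCore_init (G : List (List (Int × Int))) :
    pvCore G.length (List.replicate G.length (none : Option Nat))
      (List.replicate G.length (0 : Int)) (List.replicate G.length (none : Option Int))
      ((List.replicate G.length false).set 0 true) (fun _ => 0) := by
  intro v hv
  rw [pvGetD_replicate G.length v (none : Option Nat) none hv,
    pvGetD_replicate G.length v (none : Option Int) none hv]
  exact ⟨fun _ => rfl, fun _ => rfl, fun _ => Nat.zero_le _, fun u h => absurd h (by simp)⟩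

-- ===== VERDICT =====
theorem get_min_from_path_spec : Claim_equal_get_min_from_path := by
  intro G _hdom hpre
  obtain ⟨hn2, _hreach, _hvalid⟩ := hpre
  unfold Spec_get_min_from_path get_min_from_path get_min_from_path_alt
  dsimp only
  have h01 : 0 < G.length := by omega
  have hqok : pvQOK G.length ((List.replicate G.length false).set 0 true) [0] := by
    intro x hx
    have hx0 : x = 0 := by simpa using hx
    subst hx0
    exact ⟨h01, pvGetD_set_self _ 0 true false (by simpa using h01)⟩
  obtain ⟨hlenvis, d', hcore⟩ :=
    pvPairBFS G G.length rfl
      (((List.replicate G.length false).set 0 true).count false + 1)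
      [0] ((List.replicate G.length false).set 0 true)
      (List.replicate G.length (none : Option Nat)) (List.replicate G.length (0 : Int))
      (List.replicate G.length (none : Option Int)) (fun _ => 0)
      (by omega) (by simp) (by simp) (by simp) (by simp) hqok (pvCore_init G)
  have h1n : 1 < G.length := by omega
  cases hp : (pvLoopA G [0] ((List.replicate G.length false).set 0 true)
      (List.replicate G.length (none : Option Nat)) (List.replicate G.length (0 : Int))).2.1.getD 1 none with
  | none =>
    have hbn := (hcore 1 h1n).1 hp
    rw [hbn]
    simp [pvBackA, PySem.List.min?]
  | some u =>
    have hvis1 : (pvLoopA G [0] ((List.replicate G.length false).set 0 true)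
        (List.replicate G.length (none : Option Nat)) (List.replicate G.length (0 : Int))).1.getD 1 false = true := by
      cases hb : (pvLoopA G [0] ((List.replicate G.length false).set 0 true)
          (List.replicate G.length (none : Option Nat)) (List.replicate G.length (0 : Int))).1.getD 1 false with
      | false => rw [(hcore 1 h1n).2.1 hb] at hp; exact absurd hp (by simp)
      | true => rfl
    have hd1 : d' 1 < G.length + 1 := by
      have h1 := (hcore 1 h1n).2.2.1 hvis1
      have h2 := List.count_le_length (l := (pvLoopA G [0] ((List.replicate G.length false).set 0 true)
        (List.replicate G.length (none : Option Nat)) (List.replicate G.length (0 : Int))).1) (a := true)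
      omega
    have hback := pvBack_min G.length _ _ _ _ d' hcore (G.length + 1) 1 h1n hd1 []
    rw [List.nil_append, hp] at hback
    rw [hback]
    obtain ⟨-, -, -, hbest⟩ := (hcore 1 h1n).2.2.2 u hp
    rw [hbest]
    rfl
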